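-- pv_equiv track=rewrite | github.com/RohitAthithya/MyDSA | python_dive_deep/Random programs/starters172_3.py | streak_value_on2
-- ===== SOURCE A (Python) =====
-- def create_arrays(lst: list[int], N: int, X: int):
--     out_lst = []
--     for i in range(N):
--         tmp = lst[:]
--         tmp[i] = tmp[i] * X
--         out_lst.append(tmp)
--     return out_lst
--
-- def streak_value_on2(lst: list[int], N: int, X: int) -> int:
--     possible_arrays = create_arrays(lst, N, X)
--     max_num = 0
--     for inner_lst in possible_arrays:
--         tmp = []
--         for idx, elem in enumerate(inner_lst, start=1):
--             if idx == N - 1: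
--                 break
--             tmp.append(elem)
--             if elem < inner_lst[idx] :
--                 tmp.append(elem)
--         curr_max = len(tmp)
--         max_num = max_num if curr_max < max_num else curr_max
--     return max_num
-- ===== SOURCE B (Python) =====
-- def streak_value_on2(lst: list[int], N: int, X: int) -> int:
--     # O(N): base ascent count once, then an O(1) delta per modified index.
--     if N <= 0:
--         return 0
--     base = 0
--     for j in range(N - 2):
--         if lst[j] < lst[j + 1]:
--             base += 1
--     best = None
--     for i in range(N):
--         d = 0
--         for j in (i - 1, i):
--             if 0 <= j < N - 2:
--                 a = lst[j] * X if j == i else lst[j]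
--                 b = lst[j + 1] * X if j + 1 == i else lst[j + 1]
--                 d += (1 if a < b else 0) - (1 if lst[j] < lst[j + 1] else 0)
--         if best is None or d > best:
--             best = d
--     return (N - 2) + base + best
-- ===== Notes on version B (the rewrite author's own statement) =====
-- stated objective: faster
-- what changed: Instead of materialising all N scaled copies of the list and rescanning each (O(N^2)), B counts the ascents of the base list once and, for each scaled index i, adjusts only the at-most-two adjacent comparisons i-1<i and i<i+1 in O(1), taking the maximum adjustment.
import Mathlib
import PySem

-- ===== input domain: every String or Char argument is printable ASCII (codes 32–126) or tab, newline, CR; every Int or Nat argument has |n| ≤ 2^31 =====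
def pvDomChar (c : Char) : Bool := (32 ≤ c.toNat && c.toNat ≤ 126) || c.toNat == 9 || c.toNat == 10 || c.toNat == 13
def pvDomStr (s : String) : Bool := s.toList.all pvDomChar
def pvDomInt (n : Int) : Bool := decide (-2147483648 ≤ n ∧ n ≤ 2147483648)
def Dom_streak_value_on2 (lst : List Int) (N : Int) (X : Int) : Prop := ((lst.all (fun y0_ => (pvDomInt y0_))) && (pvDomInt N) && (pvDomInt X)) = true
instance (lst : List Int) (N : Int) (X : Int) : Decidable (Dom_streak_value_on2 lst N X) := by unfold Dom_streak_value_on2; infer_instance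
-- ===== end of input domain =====

-- B replaces A's "build all N scaled copies and rescan each" with one base ascent count plus an O(1) delta per scaled index (asymptotically faster).

-- ===== PORT A =====
-- create_arrays: for i in range(N): tmp = lst[:]; tmp[i] = tmp[i]*X; out.append(tmp)
def pvCreateArrays (lst : List Int) (N : Int) (X : Int) : List (List Int) :=
  (PySem.List.pyRange 0 N 1).foldl
    (fun out i =>
      let tmp := lst
      let tmp := PySem.List.pySetD tmp i (PySem.List.pyGetD tmp i 0 * X)
      out ++ [tmp]) []

-- inner loop of A: for idx, elem in enumerate(inner_lst, start=1): if idx == N-1: break; …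
def pvTmpLoop (rest : List Int) (inner : List Int) (N : Int) (idx : Int) (tmp : List Int) : List Int :=
  match rest with
  | [] => tmp
  | e :: r =>
      if idx = N - 1 then tmp
      else
        let tmp := tmp ++ [e]
        let tmp := if e < PySem.List.pyGetD inner idx 0 then tmp ++ [e] else tmp
        pvTmpLoop r inner N (idx + 1) tmp

def streak_value_on2 (lst : List Int) (N : Int) (X : Int) : Int :=
  let possible_arrays := pvCreateArrays lst N X
  possible_arrays.foldl
    (fun max_num inner =>
      let curr_max : Int := PySem.List.len (pvTmpLoop inner inner N 1 [])
      if curr_max < max_num then max_num else curr_max) 0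

-- ===== PORT B =====
-- d for index i: adjust the at-most-two comparisons (i-1,i) and (i,i+1)
def pvDelta (lst : List Int) (N : Int) (X : Int) (i : Int) : Int :=
  [i - 1, i].foldl
    (fun d j =>
      if 0 ≤ j ∧ j < N - 2 then
        let a := if j = i then PySem.List.pyGetD lst j 0 * X else PySem.List.pyGetD lst j 0
        let b := if j + 1 = i then PySem.List.pyGetD lst (j + 1) 0 * X else PySem.List.pyGetD lst (j + 1) 0
        d + ((if a < b then 1 else 0) - (if PySem.List.pyGetD lst j 0 < PySem.List.pyGetD lst (j + 1) 0 then 1 else 0))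
      else d) 0

def streak_value_on2_alt (lst : List Int) (N : Int) (X : Int) : Int :=
  if N ≤ 0 then 0
  else
    let base := (PySem.List.pyRange 0 (N - 2) 1).foldl
      (fun b j => if PySem.List.pyGetD lst j 0 < PySem.List.pyGetD lst (j + 1) 0 then b + 1 else b) (0 : Int)
    let best := (PySem.List.pyRange 0 N 1).foldl
      (fun (best : Option Int) i =>
        let d := pvDelta lst N X i
        match best with
        | none => some d
        | some b => if d > b then some d else some b) none
    (N - 2) + base + best.getD 0

-- ===== PRECONDITION & SPEC =====
-- Pre_ excludes exactly the inputs on which A raises IndexError (N = 1, or 2 ≤ N with len(lst) < N); nothing else is excluded.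
def Pre_streak_value_on2 (lst : List Int) (N : Int) (X : Int) : Prop :=
  N ≤ 0 ∨ (2 ≤ N ∧ N ≤ (lst.length : Int))
instance (lst : List Int) (N : Int) (X : Int) : Decidable (Pre_streak_value_on2 lst N X) := by
  unfold Pre_streak_value_on2; infer_instance

def pvWitness_streak_value_on2 : List Int × Int × Int := ([1, 5, 2], 3, 2)

def Spec_streak_value_on2 (lst : List Int) (N : Int) (X : Int) (out : Int) : Prop := out = streak_value_on2_alt lst N X
instance (lst : List Int) (N : Int) (X : Int) (out : Int) : Decidable (Spec_streak_value_on2 lst N X out) := by unfold Spec_streak_value_on2; infer_instance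

-- ===== CLAIM (what is proved, stated in full; the proofs are below) =====
def Claim_equal_streak_value_on2 : Prop := ∀ (lst : List Int) (N : Int) (X : Int), Dom_streak_value_on2 lst N X → Pre_streak_value_on2 lst N X → Spec_streak_value_on2 lst N X (streak_value_on2 lst N X)

-- ===== LEMMAS AND PROOFS =====

-- ascent count of the first m adjacent pairs
def pvAsc (xs : List Int) : Nat → Int
  | 0 => 0
  | m + 1 => pvAsc xs m + (if xs.getD m 0 < xs.getD (m + 1) 0 then 1 else 0)

lemma pvTmpLoop_len (inner : List Int) (N : Int) (hlen : N - 1 ≤ (inner.length : Int)) :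
    ∀ (f k : Nat) (tmp : List Int), (k : Int) + (f : Int) = N - 2 →
      ((pvTmpLoop (inner.drop k) inner N ((k : Int) + 1) tmp).length : Int)
        = (tmp.length : Int) + f + (pvAsc inner (k + f) - pvAsc inner k) := by
  intro f
  induction f with
  | zero =>
    intro k tmp hk
    have hk' : (k : Int) + 1 = N - 1 := by omega
    rcases hdrop : inner.drop k with _ | ⟨e, r⟩
    · unfold pvTmpLoop; simp
    · unfold pvTmpLoop; rw [if_pos hk']; simp
  | succ f ih =>
    intro k tmp hk
    have hkl : k < inner.length := by omega
    have hdrop : inner.drop k = inner[k] :: inner.drop (k + 1) := List.drop_eq_getElem_cons hkl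
    rw [hdrop]
    unfold pvTmpLoop
    rw [if_neg (by push_cast; omega)]
    have hidx : ((k : Int) + 1) = ((k + 1 : Nat) : Int) := by push_cast; ring
    have hget : PySem.List.pyGetD inner ((k : Int) + 1) 0 = inner.getD (k + 1) 0 := by
      rw [hidx, PySem.List.pyGetD_natCast]
    have hik : inner[k] = inner.getD k 0 := (List.getD_eq_getElem inner 0 hkl).symm
    have harg : ((k + 1 : Nat) : Int) + (f : Int) = N - 2 := by push_cast; push_cast at hk; omega
    have hasc : pvAsc inner (k + 1) = pvAsc inner k + (if inner.getD k 0 < inner.getD (k + 1) 0 then 1 else 0) := rfl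
    have hkf : k + (f + 1) = (k + 1) + f := by omega
    rw [hidx]
    by_cases hc : inner.getD k 0 < inner.getD (k + 1) 0
    · simp only [hik, PySem.List.pyGetD_natCast]
      rw [if_pos hc, ih (k + 1) _ harg, hkf, hasc, if_pos hc]
      simp only [List.length_append, List.length_cons, List.length_nil]
      push_cast
      ring
    · simp only [hik, PySem.List.pyGetD_natCast]
      rw [if_neg hc, ih (k + 1) _ harg, hkf, hasc, if_neg hc]
      simp only [List.length_append, List.length_cons, List.length_nil]
      push_cast
      ring

lemma pvAsc_set (m xs : List Int) (iN : Nat)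
    (h : ∀ j, j ≠ iN → m.getD j 0 = xs.getD j 0) :
    ∀ f : Nat, pvAsc m f = pvAsc xs f
      + (if 1 ≤ iN ∧ iN ≤ f then
          (if m.getD (iN - 1) 0 < m.getD iN 0 then 1 else 0)
          - (if xs.getD (iN - 1) 0 < xs.getD iN 0 then (1:Int) else 0) else 0)
      + (if iN + 1 ≤ f then
          (if m.getD iN 0 < m.getD (iN + 1) 0 then 1 else 0)
          - (if xs.getD iN 0 < xs.getD (iN + 1) 0 then (1:Int) else 0) else 0) := by
  intro f
  induction f with
  | zero => simp [pvAsc]; omega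
  | succ f ih =>
    rw [pvAsc, pvAsc, ih]
    by_cases h1 : f = iN
    · subst h1
      rw [if_neg (by omega : ¬ (f + 1 ≤ f)), if_pos (by omega : f + 1 ≤ f + 1)]
      by_cases h1le : 1 ≤ f
      · rw [if_pos (⟨h1le, by omega⟩ : 1 ≤ f ∧ f ≤ f), if_pos (⟨h1le, by omega⟩ : 1 ≤ f ∧ f ≤ f + 1)]
        split_ifs <;> omega
      · rw [if_neg (fun hx : 1 ≤ f ∧ f ≤ f => h1le hx.1), if_neg (fun hx : 1 ≤ f ∧ f ≤ f + 1 => h1le hx.1)]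
        split_ifs <;> omega
    · by_cases h2 : f + 1 = iN
      · have hiN1 : iN - 1 = f := by omega
        rw [if_neg (by omega : ¬ (1 ≤ iN ∧ iN ≤ f)), if_pos (⟨by omega, by omega⟩ : 1 ≤ iN ∧ iN ≤ f + 1),
            if_neg (by omega : ¬ (iN + 1 ≤ f)), if_neg (by omega : ¬ (iN + 1 ≤ f + 1)),
            hiN1, h _ h1, ← h2]
        split_ifs <;> omega
      · rw [h _ h1, h _ h2]
        have e1 : (1 ≤ iN ∧ iN ≤ f + 1) ↔ (1 ≤ iN ∧ iN ≤ f) := by omega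
        have e2 : (iN + 1 ≤ f + 1) ↔ (iN + 1 ≤ f) := by omega
        rw [if_congr e1 rfl rfl, if_congr e2 rfl rfl]
        ring

lemma pvCurr_eq (lst : List Int) (N X : Int) (h2 : 2 ≤ N) (hlen : N ≤ (lst.length : Int))
    (i : Int) (h0 : 0 ≤ i) (hiN : i < N) :
    (((pvTmpLoop (PySem.List.pySetD lst i (PySem.List.pyGetD lst i 0 * X)) (PySem.List.pySetD lst i (PySem.List.pyGetD lst i 0 * X)) N 1 []).length : Int))
      = (N - 2) + pvAsc lst (N - 2).toNat + pvDelta lst N X i := by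
  obtain ⟨iN, rfl⟩ : ∃ n : Nat, i = (n : Int) := ⟨i.toNat, (Int.toNat_of_nonneg h0).symm⟩
  have hiL : iN < lst.length := by omega
  set v : Int := PySem.List.pyGetD lst (iN : Int) 0 * X with hv
  have hvv : v = lst.getD iN 0 * X := by rw [hv, PySem.List.pyGetD_natCast]
  set m : List Int := PySem.List.pySetD lst (iN : Int) v with hm
  have hmm : m = lst.set iN v := by rw [hm, PySem.List.pySetD_natCast]
  have hmlen : m.length = lst.length := by rw [hmm, List.length_set]
  have hne : ∀ j, j ≠ iN → m.getD j 0 = lst.getD j 0 := by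
    intro j hj
    simp [hmm, List.getD, List.getElem?_set_ne (Ne.symm hj)]
  have hself : m.getD iN 0 = v := by
    simp [hmm, List.getD, List.getElem?_set_self, hiL]
  have hT := pvTmpLoop_len m N (by rw [hmlen]; omega) (N - 2).toNat 0 []
      (by push_cast; omega)
  simp only [List.drop_zero, Nat.cast_zero, zero_add, List.length_nil] at hT
  rw [hT]
  have hAsc := pvAsc_set m lst iN hne (N - 2).toNat
  rw [hAsc]
  have hF : ((N - 2).toNat : Int) = N - 2 := by omega
  rw [hF]
  simp only [pvDelta, List.foldl_cons, List.foldl_nil, pvAsc]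
  rw [if_neg (by omega : ¬ ((iN : Int) + 1 = (iN : Int)))]
  have hadd : ((iN : Int) + 1) = ((iN + 1 : Nat) : Int) := by push_cast; ring
  by_cases c2 : iN + 1 ≤ (N - 2).toNat
  · rw [if_pos c2, if_pos (show 0 ≤ (iN : Int) ∧ (iN : Int) < N - 2 by omega)]
    by_cases c1 : 1 ≤ iN ∧ iN ≤ (N - 2).toNat
    · rw [if_pos c1, if_pos (show 0 ≤ (iN : Int) - 1 ∧ (iN : Int) - 1 < N - 2 by omega)]
      have hs1 : ((iN : Int) - 1 + 1) = (iN : Int) := by ring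
      have hsub : ((iN : Int) - 1) = ((iN - 1 : Nat) : Int) := by omega
      rw [hs1, hsub, hadd]
      simp only [PySem.List.pyGetD_natCast]
      rw [hne (iN - 1) (by omega), hne (iN + 1) (by omega), hself, hvv,
          if_neg (show ¬ (((iN - 1 : Nat) : Int) = (iN : Int)) by omega)]
      simp only [if_true]
      ring
    · rw [if_neg c1, if_neg (show ¬ (0 ≤ (iN : Int) - 1 ∧ (iN : Int) - 1 < N - 2) by omega)]
      rw [hadd]
      simp only [PySem.List.pyGetD_natCast]
      rw [hne (iN + 1) (by omega), hself, hvv]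
      simp only [if_true]
      ring
  · rw [if_neg c2, if_neg (show ¬ (0 ≤ (iN : Int) ∧ (iN : Int) < N - 2) by omega)]
    by_cases c1 : 1 ≤ iN ∧ iN ≤ (N - 2).toNat
    · rw [if_pos c1, if_pos (show 0 ≤ (iN : Int) - 1 ∧ (iN : Int) - 1 < N - 2 by omega)]
      have hs1 : ((iN : Int) - 1 + 1) = (iN : Int) := by ring
      have hsub : ((iN : Int) - 1) = ((iN - 1 : Nat) : Int) := by omega
      rw [hs1, hsub]
      simp only [PySem.List.pyGetD_natCast]
      rw [hne (iN - 1) (by omega), hself, hvv,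
          if_neg (show ¬ (((iN - 1 : Nat) : Int) = (iN : Int)) by omega)]
      simp only [if_true]
      ring
    · rw [if_neg c1, if_neg (show ¬ (0 ≤ (iN : Int) - 1 ∧ (iN : Int) - 1 < N - 2) by omega)]
      ring

lemma pvMaxFold (C : Int) (d : Int → Int) :
    ∀ (t : List Int) (b m : Int), m = C + b →
      t.foldl (fun m i => if C + d i < m then m else C + d i) m
        = C + (t.foldl (fun (best : Option Int) i =>
            match best with
            | none => some (d i)
            | some b => if d i > b then some (d i) else some b) (some b)).getD 0 := by
  intro t
  induction t with
  | nil => intro b m hm; simpa using hm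
  | cons a t ih =>
    intro b m hm
    rw [List.foldl_cons, List.foldl_cons]
    have hstep : (if C + d a < m then m else C + d a) = C + (if d a > b then d a else b) := by
      subst hm; split_ifs <;> omega
    rw [hstep]
    have hred : (match some b with
            | none => some (d a)
            | some b => if d a > b then some (d a) else some b)
          = some (if d a > b then d a else b) := by
      split
      · simp_all
      · rename_i b' hb'
        injection hb' with hb'
        subst hb'
        exact (apply_ite some (d a > b) (d a) b).symm
    rw [hred]
    exact ih (if d a > b then d a else b) _ rfl

lemma pvBaseEq (lst : List Int) :
    ∀ M : Nat, (PySem.List.pyRange 0 (M : Int) 1).foldl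
        (fun b j => if PySem.List.pyGetD lst j 0 < PySem.List.pyGetD lst (j + 1) 0 then b + 1 else b) (0 : Int)
      = pvAsc lst M := by
  intro M
  induction M with
  | zero =>
    simp only [Nat.cast_zero]
    rw [PySem.List.pyRange_one_eq_nil (by omega : (0:Int) ≤ 0)]
    simp [pvAsc]
  | succ M ih =>
    have hsplit : PySem.List.pyRange 0 ((M + 1 : Nat) : Int) 1
        = PySem.List.pyRange 0 (M : Int) 1 ++ [(M : Int)] := by
      have h0M : (0:Int) ≤ (M : Int) := by omega
      have := PySem.List.pyRange_one_succ_right h0M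
      simpa using this
    rw [hsplit, List.foldl_append, ih, List.foldl_cons, List.foldl_nil, pvAsc]
    have hadd : ((M : Int) + 1) = ((M + 1 : Nat) : Int) := by push_cast; ring
    rw [hadd]
    simp only [PySem.List.pyGetD_natCast]
    split_ifs <;> omega


theorem streak_value_on2_spec : Claim_equal_streak_value_on2 := by
  intro lst N X _ hpre
  unfold Spec_streak_value_on2 streak_value_on2 streak_value_on2_alt
  by_cases hN : N ≤ 0
  · rw [if_pos hN]
    unfold pvCreateArrays
    rw [PySem.List.pyRange_one_eq_nil (by omega)]
    rfl
  · rw [if_neg hN]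
    have h2 : 2 ≤ N := by unfold Pre_streak_value_on2 at hpre; omega
    have hlen : N ≤ (lst.length : Int) := by unfold Pre_streak_value_on2 at hpre; omega
    have hca : pvCreateArrays lst N X
        = (PySem.List.pyRange 0 N 1).map (fun i => PySem.List.pySetD lst i (PySem.List.pyGetD lst i 0 * X)) := by
      unfold pvCreateArrays
      rw [PySem.List.foldl_append_singleton_eq_map]
      simp
    rw [hca, List.foldl_map]
    simp only [PySem.List.len_eq]
    have hbase : (PySem.List.pyRange 0 (N - 2) 1).foldl
        (fun b j => if PySem.List.pyGetD lst j 0 < PySem.List.pyGetD lst (j + 1) 0 then b + 1 else b) (0 : Int)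
        = pvAsc lst (N - 2).toNat := by
      rw [show (N - 2) = (((N - 2).toNat : Nat) : Int) by omega]
      exact pvBaseEq lst (N - 2).toNat
    rw [hbase]
    have hcongr : ∀ (acc : Int) (i : Int), i ∈ PySem.List.pyRange 0 N 1 →
        (fun (x : Int) (y : Int) =>
          if ((pvTmpLoop (PySem.List.pySetD lst y (PySem.List.pyGetD lst y 0 * X))
                (PySem.List.pySetD lst y (PySem.List.pyGetD lst y 0 * X)) N 1 []).length : Int) < x then x
          else ((pvTmpLoop (PySem.List.pySetD lst y (PySem.List.pyGetD lst y 0 * X))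
                (PySem.List.pySetD lst y (PySem.List.pyGetD lst y 0 * X)) N 1 []).length : Int)) acc i
        = (fun (m : Int) (i : Int) =>
            if N - 2 + pvAsc lst (N - 2).toNat + pvDelta lst N X i < m then m
            else N - 2 + pvAsc lst (N - 2).toNat + pvDelta lst N X i) acc i := by
      intro acc i hi
      rw [PySem.List.mem_pyRange_one] at hi
      simp only
      rw [pvCurr_eq lst N X h2 hlen i hi.1 hi.2]
    rw [PySem.List.foldl_congr_mem _ _ _ _ hcongr]
    rw [PySem.List.pyRange_one_cons (by omega : (0:Int) < N), List.foldl_cons, List.foldl_cons]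
    have hnn : (0:Int) ≤ N - 2 + pvAsc lst (N - 2).toNat + pvDelta lst N X 0 := by
      rw [← pvCurr_eq lst N X h2 hlen 0 (le_refl 0) (by omega)]
      exact Int.natCast_nonneg _
    rw [if_neg (by omega : ¬ (N - 2 + pvAsc lst (N - 2).toNat + pvDelta lst N X 0 < 0))]
    have hred : (match (none : Option Int) with
          | none => some (pvDelta lst N X 0)
          | some b => if pvDelta lst N X 0 > b then some (pvDelta lst N X 0) else some b)
        = some (pvDelta lst N X 0) := rfl
    rw [hred, show (0:Int) + 1 = 1 by norm_num]
    rw [pvMaxFold (N - 2 + pvAsc lst (N - 2).toNat) (pvDelta lst N X) (PySem.List.pyRange 1 N 1)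
        (pvDelta lst N X 0) _ rfl]
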